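-- pv_equiv track=rewrite | github.com/trungpd56/aoc2018 | 05.py | solve
-- ===== SOURCE A (Python) =====
-- def solve(line):
--     result = [""]
--     for c in line:
--         if c == result[-1].swapcase():
--             result.pop()
--         else:
--             result.append(c)
--     return "".join(result)
-- ===== SOURCE B (Python) =====
-- def _one_pass(s):
--     out = []
--     i = 0
--     while i < len(s):
--         if i + 1 < len(s) and s[i + 1] == s[i].swapcase():
--             i += 2
--         else:
--             out.append(s[i])
--             i += 1
--     return "".join(out)
--
--
-- def solve(line):
--     cur = line
--     while True:
--         nxt = _one_pass(cur)
--         if len(nxt) == len(cur):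
--             return nxt
--         cur = nxt
-- ===== Notes on version B (the rewrite author's own statement) =====
-- stated objective: alternative
-- what changed: Replaces A's single stack-based pass (push/pop against the last kept element) with repeated left-to-right pair-removal sweeps iterated to a fixed point.
import Mathlib
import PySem

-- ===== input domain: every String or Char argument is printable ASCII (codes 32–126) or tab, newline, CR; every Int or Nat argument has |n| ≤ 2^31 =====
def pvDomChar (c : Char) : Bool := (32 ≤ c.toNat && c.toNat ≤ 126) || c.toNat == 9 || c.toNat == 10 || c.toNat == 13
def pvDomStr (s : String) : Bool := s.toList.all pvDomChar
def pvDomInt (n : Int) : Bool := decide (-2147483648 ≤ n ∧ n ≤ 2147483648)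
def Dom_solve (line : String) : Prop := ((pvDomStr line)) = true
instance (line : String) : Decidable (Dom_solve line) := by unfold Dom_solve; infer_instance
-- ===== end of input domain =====

-- B replaces A's single stack pass with repeated pair-removal sweeps iterated to a fixed point
-- (alternative decomposition, not faster).

-- str.swapcase for one Char, exact on ASCII (the stated domain)
def pySwapChar (c : Char) : Char :=
  if 97 ≤ c.toNat ∧ c.toNat ≤ 122 then Char.ofNat (c.toNat - 32)
  else if 65 ≤ c.toNat ∧ c.toNat ≤ 90 then Char.ofNat (c.toNat + 32)
  else c

-- str.swapcase on a whole string (A compares against result[-1].swapcase())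
def pySwapStr (s : String) : String := String.ofList (s.toList.map pySwapChar)

-- ===== PORT A =====
-- accumulator is Python's `result` reversed (head = result[-1]); append/pop act on the head
def solveLoopA (acc : List String) : List Char → List String
  | [] => acc
  | c :: rest =>
    match acc with
    | top :: tail =>
      if String.ofList [c] = pySwapStr top then solveLoopA tail rest
      else solveLoopA (String.ofList [c] :: top :: tail) rest
    | [] => solveLoopA [String.ofList [c]] rest  -- unreachable: the "" sentinel is never popped

def solve (line : String) : String :=
  PySem.Str.join "" (solveLoopA [""] line.toList).reverse

-- ===== PORT B =====
-- one left-to-right sweep of Source B's _one_pass: drop each reacting pair, keep other chars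
def passOnce : List Char → List Char
  | [] => []
  | [a] => [a]
  | a :: b :: rest => if b = pySwapChar a then passOnce rest else a :: passOnce (b :: rest)

-- needed by solveAltLoop's termination (the sweep never grows the string)
theorem passOnce_length_le (cs : List Char) : (passOnce cs).length ≤ cs.length := by
  induction cs using passOnce.induct with
  | case1 => simp [passOnce]
  | case2 a => simp [passOnce]
  | case3 a rest ih =>
    simp only [passOnce, reduceIte]
    simp only [List.length_cons]
    omega
  | case4 a b rest hb ih =>
    simp only [passOnce, if_neg hb]
    simp only [List.length_cons] at ih ⊢
    omega

-- Source B's outer loop: sweep until a sweep removes nothing (length unchanged)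
def solveAltLoop (cs : List Char) : List Char :=
  if _h : (passOnce cs).length = cs.length then passOnce cs
  else solveAltLoop (passOnce cs)
termination_by cs.length
decreasing_by
  have := passOnce_length_le cs
  omega

def solve_alt (line : String) : String := String.ofList (solveAltLoop line.toList)

-- ===== PRECONDITION & SPEC =====
def Spec_solve (line : String) (out : String) : Prop := out = solve_alt line
instance (line : String) (out : String) : Decidable (Spec_solve line out) := by unfold Spec_solve; infer_instance

-- ===== CLAIM (what is proved, stated in full; the proofs are below) =====
def Claim_equal_solve : Prop := ∀ (line : String), Dom_solve line → Spec_solve line (solve line)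

-- ===== LEMMAS AND PROOFS =====

theorem toNat_ofNat_small {n : Nat} (h : n < 55296) : (Char.ofNat n).toNat = n := by
  rw [Char.toNat_ofNat]
  have hv : n.isValidChar := by left; exact h
  simp [hv]

-- pySwapChar is an involution (on every Char)
theorem swap_invol (c : Char) : pySwapChar (pySwapChar c) = c := by
  unfold pySwapChar
  split_ifs with h1 h2 h3 h4 h5 h6
  all_goals try rw [toNat_ofNat_small (by omega)] at *
  all_goals first
    | rfl
    | omega
    | rw [show c.toNat - 32 + 32 = c.toNat from by omega, Char.ofNat_toNat]
    | rw [show c.toNat + 32 - 32 = c.toNat from by omega, Char.ofNat_toNat]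

-- "a and b do not react", symmetric form
def NR (a b : Char) : Prop := ¬ a = pySwapChar b ∧ ¬ b = pySwapChar a

theorem nr_symm {a b : Char} (h : NR a b) : NR b a := ⟨h.2, h.1⟩

theorem nr_of_not {a b : Char} (h : ¬ b = pySwapChar a) : NR a b :=
  ⟨fun e => h (by rw [e, swap_invol]), h⟩

-- the character-level stack machine both ports are reduced to (head = top of stack)
def stackRun : List Char → List Char → List Char
  | st, [] => st
  | st, c :: rest =>
    match st with
    | [] => stackRun [c] rest
    | p :: t => if c = pySwapChar p then stackRun t rest else stackRun (c :: p :: t) rest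

-- ---- A-side: solveLoopA is stackRun on the string images of the stack ----
theorem swapStr_single (p : Char) :
    pySwapStr (String.ofList [p]) = String.ofList [pySwapChar p] := by
  simp [pySwapStr]

theorem solveLoopA_eq_stackRun (cs : List Char) :
    ∀ st : List Char,
      solveLoopA (st.map (fun c => String.ofList [c]) ++ [""]) cs
        = (stackRun st cs).map (fun c => String.ofList [c]) ++ [""] := by
  induction cs with
  | nil => intro st; simp [solveLoopA, stackRun]
  | cons c rest ih =>
    intro st
    cases st with
    | nil =>
      have hne : ¬ String.ofList [c] = pySwapStr "" := by
        intro h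
        have := congrArg String.toList h
        simp [pySwapStr] at this
      simp only [List.map_nil, List.nil_append, solveLoopA, if_neg hne, stackRun]
      simpa using ih [c]
    | cons p t =>
      have hiff : (String.ofList [c] = pySwapStr (String.ofList [p])) ↔ (c = pySwapChar p) := by
        rw [swapStr_single]
        constructor
        · intro h
          have := congrArg String.toList h
          simpa using this
        · intro h; rw [h]
      by_cases hc : c = pySwapChar p
      · simp only [List.map_cons, List.cons_append, solveLoopA, if_pos (hiff.mpr hc),
          stackRun, if_pos hc]
        exact ih t
      · simp only [List.map_cons, List.cons_append, solveLoopA,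
          if_neg (fun h => hc (hiff.mp h)), stackRun, if_neg hc]
        simpa using ih (c :: p :: t)

-- join with "" of the "" sentinel plus singleton strings recovers the char list
theorem join_sentinel (l : List Char) :
    PySem.Str.join "" ("" :: l.map (fun c => String.ofList [c])) = String.ofList l := by
  apply String.toList_inj.mp
  rw [PySem.Str.toList_join]
  have step : ∀ xs : List (List Char),
      PySem.Chars.join [] ([] :: xs) = PySem.Chars.join [] xs := by
    intro xs
    cases xs with
    | nil => rfl
    | cons a t => simp [PySem.Chars.join, List.intercalate, List.intersperse]
  have hmap : (List.map String.toList ("" :: l.map (fun c => String.ofList [c])))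
      = [] :: l.map (fun c => [c]) := by
    simp [List.map_map, Function.comp]
  rw [hmap]
  have hsep : ("" : String).toList = [] := rfl
  rw [hsep, step, PySem.Chars.join_nil_singletons]
  simp

theorem solve_eq_stack (line : String) :
    solve line = String.ofList (stackRun [] line.toList).reverse := by
  unfold solve
  have h := solveLoopA_eq_stackRun line.toList []
  simp only [List.map_nil, List.nil_append] at h
  rw [h]
  rw [List.reverse_append, List.reverse_cons, List.reverse_nil, List.nil_append]
  rw [← List.map_reverse]
  exact join_sentinel _

-- ---- B-side lemmas ----
theorem passOnce_fix {cs : List Char} (h : (passOnce cs).length = cs.length) :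
    passOnce cs = cs := by
  induction cs using passOnce.induct with
  | case1 => rfl
  | case2 a => rfl
  | case3 a rest ih =>
    exfalso
    have hle := passOnce_length_le rest
    simp only [passOnce, reduceIte, List.length_cons] at h
    omega
  | case4 a b rest hb ih =>
    simp only [passOnce, if_neg hb] at h ⊢
    simp only [List.length_cons] at h
    have : (passOnce (b :: rest)).length = (b :: rest).length := by
      simp only [List.length_cons]; omega
    rw [ih this]

theorem passOnce_irr {cs : List Char} (h : passOnce cs = cs) : List.IsChain NR cs := by
  induction cs using passOnce.induct with
  | case1 => simp
  | case2 a => simp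
  | case3 a rest ih =>
    exfalso
    simp only [passOnce, reduceIte] at h
    have := congrArg List.length h
    have hle := passOnce_length_le rest
    simp only [List.length_cons] at this
    omega
  | case4 a b rest hb ih =>
    simp only [passOnce, if_neg hb, List.cons.injEq, true_and] at h
    rw [List.isChain_cons]
    refine ⟨?_, ih h⟩
    intro y hy
    simp at hy
    subst hy
    exact nr_of_not hb

-- an irreducible string runs straight through the stack machine
theorem stackRun_irr :
    ∀ (cs st : List Char), List.IsChain NR cs → List.IsChain NR st →
      (∀ a ∈ cs.head?, ∀ p ∈ st.head?, NR a p) →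
      stackRun st cs = cs.reverse ++ st := by
  intro cs
  induction cs with
  | nil => intro st _ _ _; simp [stackRun]
  | cons a g ih =>
    intro st hcs hst hj
    cases st with
    | nil =>
      simp only [stackRun]
      rw [ih [a] hcs.tail (by simp)
        (by
          intro b hb p hp
          simp at hp
          subst hp
          exact nr_symm ((List.isChain_cons.mp hcs).1 b hb))]
      simp
    | cons p t =>
      have hap : NR a p := hj a (by simp) p (by simp)
      simp only [stackRun, if_neg hap.1]
      rw [ih (a :: p :: t) hcs.tail
        (List.isChain_cons.mpr ⟨by intro y hy; simp at hy; subst hy; exact hap, hst⟩)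
        (by
          intro b hb q hq
          simp at hq
          subst hq
          exact nr_symm ((List.isChain_cons.mp hcs).1 b hb))]
      simp

-- one sweep does not change the stack-machine result (for an irreducible stack)
theorem stackRun_passOnce (cs : List Char) :
    ∀ st : List Char, List.IsChain NR st →
      stackRun st (passOnce cs) = stackRun st cs := by
  induction cs using passOnce.induct with
  | case1 => intro st _; rfl
  | case2 a => intro st _; rfl
  | case3 a rest ih =>
    intro st hst
    simp only [passOnce, reduceIte]
    rw [ih st hst]
    cases st with
    | nil => simp [stackRun]
    | cons p t =>
      by_cases hap : a = pySwapChar p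
      · have hbp : pySwapChar a = p := by rw [hap, swap_invol]
        simp only [stackRun, if_pos hap, hbp]
        cases t with
        | nil => simp
        | cons q u =>
          have hnr : NR p q := (List.isChain_cons.mp hst).1 q (by simp)
          simp [if_neg hnr.1]
      · simp [stackRun, if_neg hap]
  | case4 a b rest hb ih =>
    intro st hst
    simp only [passOnce, if_neg hb]
    cases st with
    | nil =>
      simp only [stackRun]
      exact ih [a] (by simp)
    | cons p t =>
      by_cases hap : a = pySwapChar p
      · simp only [stackRun, if_pos hap]
        exact ih t hst.tail
      · simp only [stackRun, if_neg hap]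
        exact ih (a :: p :: t)
          (List.isChain_cons.mpr ⟨by
            intro y hy; simp at hy; subst hy
            exact nr_of_not (fun e => hap (by rw [e, swap_invol])), hst⟩)

theorem solveAltLoop_eq_stack (cs : List Char) :
    solveAltLoop cs = (stackRun [] cs).reverse := by
  induction cs using solveAltLoop.induct with
  | case1 cs h =>
    rw [solveAltLoop, dif_pos h]
    have hfix : passOnce cs = cs := passOnce_fix h
    rw [hfix]
    have hirr := passOnce_irr hfix
    rw [stackRun_irr cs [] hirr (by simp) (by intro a _ p hp; simp at hp)]
    simp
  | case2 cs h ih =>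
    rw [solveAltLoop, dif_neg h, ih, stackRun_passOnce cs [] (by simp)]

-- ===== VERDICT (by name: the statement is the Claim_ definition above) =====
theorem solve_spec : Claim_equal_solve := by
  intro line _
  unfold Spec_solve solve_alt
  rw [solve_eq_stack, solveAltLoop_eq_stack]
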